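-- pv_equiv track=rewrite | github.com/NiharikaAdari/datamineresearch | gem5_traces/gem5-snoop/binary_patterns copy 2.py | remove_binary_pattern
-- ===== SOURCE A (Python) =====
-- def remove_binary_pattern(pair, trace):
--     # Find all occurrences of the binary pattern and mark them
--     marked_trace = [0] * len(trace)
--     for i in range(len(trace)):
--         if trace[i] == pair[0]:
--             marked_trace[i] = 1
--         elif trace[i] == pair[1]:
--             marked_trace[i] = 2
--
--     # Remove pairs from the trace
--     new_trace = []
--     i = 0
--     pair = -1
--     toremove = []
--     firsthalf = []
--     secondhalf = []
--     remove = 0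
--
--     while i < len(trace):
--         if marked_trace[i] == 1:
--             firsthalf.append(i) #add index for first part of potential pair
--             i+=1
--             continue
--         if marked_trace[i] == 2 and len(firsthalf)!=0:
--             if(firsthalf[0] < i): #if the index is before this
--                 remove = firsthalf.pop(0) #remove first thing in popped
--             toremove.append(remove) #the index of the first part of the pair
--             toremove.append(i) #the index of the second part of the pair
--
--         else:
--             new_trace.append(trace[i]) #unpaired index, part of pattern but not pair.
--         i+=1
--     new_trace = [trace[i] for i in range(len(trace)) if i not in toremove]
--     return new_trace
-- ===== SOURCE B (Python) =====
-- def remove_binary_pattern(pair, trace):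
--     # Closed-form characterization of the FIFO pairing via the prefix "deficit"
--     # d = (#closings so far) - (#openings so far): a closing is UNMATCHED exactly
--     # when it pushes d to a new strict running maximum above 0, and the removed
--     # openings are exactly the first m openings, m = total closings - unmatched.
--     # Two arithmetic passes, no index lists, no queues, no membership tests.
--     closings = deficit = maxdef = 0
--     for x in trace:
--         if x == pair[0]:
--             deficit -= 1
--         elif x == pair[1]:
--             closings += 1
--             deficit += 1
--             if deficit > maxdef:
--                 maxdef = deficit
--     m = closings - maxdef  # number of matched (removed) pairs
--
--     out = []
--     j = 0  # openings seen so far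
--     deficit = 0
--     maxdef = 0
--     for x in trace:
--         if x == pair[0]:
--             if j >= m:
--                 out.append(x)  # opening beyond the removed FIFO prefix
--             j += 1
--             deficit -= 1
--         elif x == pair[1]:
--             deficit += 1
--             if deficit > maxdef:
--                 maxdef = deficit
--                 out.append(x)  # unmatched closing is kept
--         else:
--             out.append(x)
--     return out
-- ===== Notes on version B (the rewrite author's own statement) =====
-- stated objective: faster
-- what changed: A simulates the pairing with a mark array, a pop-from-front queue of opening indices, an index list toremove and a per-position 'i not in toremove' scan; B instead uses a closed-form characterization of the FIFO pairing by the prefix deficit #closings-#openings (a closing is unmatched iff it sets a new strict running maximum of the deficit, and the removed openings are exactly the first m=closings-maxdeficit openings), so it is two passes of pure integer counters that emit the output directly, with no index lists, queues, sets or membership tests.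
import Mathlib
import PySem

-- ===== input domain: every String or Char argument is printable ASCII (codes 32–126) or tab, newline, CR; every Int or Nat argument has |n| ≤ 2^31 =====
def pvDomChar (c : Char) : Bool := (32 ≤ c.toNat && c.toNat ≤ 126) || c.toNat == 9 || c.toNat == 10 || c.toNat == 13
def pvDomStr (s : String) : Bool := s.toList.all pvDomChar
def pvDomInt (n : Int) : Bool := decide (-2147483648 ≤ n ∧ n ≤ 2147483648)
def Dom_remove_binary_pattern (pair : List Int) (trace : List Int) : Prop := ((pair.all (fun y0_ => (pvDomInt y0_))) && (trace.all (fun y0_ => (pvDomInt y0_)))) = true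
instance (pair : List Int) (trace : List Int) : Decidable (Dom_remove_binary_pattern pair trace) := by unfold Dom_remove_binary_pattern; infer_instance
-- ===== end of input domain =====

-- B replaces A's mark-array + pop-from-front queue of indices + per-position
-- 'i not in toremove' rebuild by two counter passes based on a closed-form
-- characterization of the FIFO pairing via the running maximum of the prefix
-- deficit (#closings - #openings); intended as faster (no index lists or
-- membership tests).

-- ===== PORT A =====
-- A's first loop: marked_trace[i] = 1 / 2 / 0 by the if/elif on trace[i]
-- (each cell written once, so the index loop is a map over trace).
def pvMarkA (pair : List Int) (x : Int) : Int :=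
  if PySem.List.pyGet? pair 0 = some x then 1
  else if PySem.List.pyGet? pair 1 = some x then 2
  else 0

-- A's while loop over (i, marked_trace[i]); state firsthalf / toremove / remove.
-- (new_trace appended in the else-branch is dead: it is reassigned by the final
-- comprehension before being returned, so it is not carried; likewise 'pair = -1'
-- happens after the marks are computed and affects nothing.)
def pvLoopA : List (Int × Int) → List Int → List Int → Int → List Int
  | [], _, toremove, _ => toremove
  | (i, m) :: rest, fh, toremove, rem =>
    if m = 1 then pvLoopA rest (fh ++ [i]) toremove rem
    else if m = 2 ∧ fh ≠ [] then
      match fh with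
      | h :: t =>
        if h < i then pvLoopA rest t (toremove ++ [h] ++ [i]) h
        else pvLoopA rest fh (toremove ++ [rem] ++ [i]) rem
      | [] => pvLoopA rest fh (toremove ++ [rem] ++ [i]) rem
    else pvLoopA rest fh toremove rem

def remove_binary_pattern (pair : List Int) (trace : List Int) : List Int :=
  let marked := trace.map (pvMarkA pair)
  let toremove := pvLoopA (PySem.List.enumerate marked 0) [] [] 0
  (PySem.List.pyRange 0 (PySem.List.len trace) 1).filterMap (fun i =>
    if i ∈ toremove then none else PySem.List.pyGet? trace i)

-- ===== PORT B =====
-- B's pass 1: state (closings, deficit, maxdef).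
def pvPass1 (pair : List Int) (st : Int × Int × Int) (x : Int) : Int × Int × Int :=
  if PySem.List.pyGet? pair 0 = some x then (st.1, st.2.1 - 1, st.2.2)
  else if PySem.List.pyGet? pair 1 = some x then
    (st.1 + 1, st.2.1 + 1, if st.2.1 + 1 > st.2.2 then st.2.1 + 1 else st.2.2)
  else st

-- B's pass 2: state (out, j, deficit, maxdef).
def pvPass2 (pair : List Int) (m : Int) (st : List Int × Int × Int × Int) (x : Int) :
    List Int × Int × Int × Int :=
  if PySem.List.pyGet? pair 0 = some x then
    ((if st.2.1 ≥ m then st.1 ++ [x] else st.1), st.2.1 + 1, st.2.2.1 - 1, st.2.2.2)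
  else if PySem.List.pyGet? pair 1 = some x then
    (if st.2.2.1 + 1 > st.2.2.2 then (st.1 ++ [x], st.2.1, st.2.2.1 + 1, st.2.2.1 + 1)
     else (st.1, st.2.1, st.2.2.1 + 1, st.2.2.2))
  else (st.1 ++ [x], st.2.1, st.2.2.1, st.2.2.2)

def remove_binary_pattern_alt (pair : List Int) (trace : List Int) : List Int :=
  let s1 := trace.foldl (pvPass1 pair) (0, 0, 0)
  let m := s1.1 - s1.2.2
  (trace.foldl (pvPass2 pair m) ([], 0, 0, 0)).1

-- ===== PRECONDITION & SPEC =====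
-- Pre_ excludes exactly the inputs where Python A raises IndexError (pair[0] or
-- pair[1] evaluated on a too-short pair; both B and A raise identically there).
def Pre_remove_binary_pattern (pair : List Int) (trace : List Int) : Prop :=
  trace = [] ∨ 2 ≤ pair.length ∨ (pair.length = 1 ∧ ∀ x ∈ trace, x ∈ pair)
instance (pair : List Int) (trace : List Int) : Decidable (Pre_remove_binary_pattern pair trace) := by unfold Pre_remove_binary_pattern; infer_instance

def pvWitness_remove_binary_pattern : List Int × List Int := ([1, 2], [1, 3, 2, 2, 1])

def Spec_remove_binary_pattern (pair : List Int) (trace : List Int) (out : List Int) : Prop := out = remove_binary_pattern_alt pair trace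
instance (pair : List Int) (trace : List Int) (out : List Int) : Decidable (Spec_remove_binary_pattern pair trace out) := by unfold Spec_remove_binary_pattern; infer_instance

-- ===== CLAIM (what is proved, stated in full; the proofs are below) =====
def Claim_equal_remove_binary_pattern : Prop := ∀ (pair : List Int) (trace : List Int), Dom_remove_binary_pattern pair trace → Pre_remove_binary_pattern pair trace → Spec_remove_binary_pattern pair trace (remove_binary_pattern pair trace)

-- ===== LEMMAS AND PROOFS =====

-- Ghost specification used only by the proofs: the FIFO pairing as explicit
-- lists of opening indices and matched closing indices.
def pvStepB (pair : List Int) (oc : List Int × List Int) (p : Int × Int) : List Int × List Int :=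
  if PySem.List.pyGet? pair 0 = some p.2 then (oc.1 ++ [p.1], oc.2)
  else if PySem.List.pyGet? pair 1 = some p.2 then
    (if oc.2.length < oc.1.length then (oc.1, oc.2 ++ [p.1]) else oc)
  else oc

lemma pvEnum_map {α β : Type} (f : α → β) :
    ∀ (xs : List α) (s : Int),
      PySem.List.enumerate (xs.map f) s
        = (PySem.List.enumerate xs s).map (fun p => (p.1, f p.2)) := by
  intro xs
  induction xs with
  | nil => intro s; simp [PySem.List.enumerate_nil]
  | cons x xs ih => intro s; simp [PySem.List.enumerate_cons, ih]

lemma pvFoldVals {σ : Type} (f : σ → Int → σ) :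
    ∀ (xs : List Int) (k : Int) (s : σ),
      (PySem.List.enumerate xs k).foldl (fun st p => f st p.2) s = xs.foldl f s := by
  intro xs
  induction xs with
  | nil => intro k s; simp [PySem.List.enumerate_nil]
  | cons x xs ih => intro k s; simp [PySem.List.enumerate_cons, ih]

-- Main loop invariant for A: A's queue `fh` is the unmatched suffix of the ghost
-- opening list, and A's `toremove` has the same members as matched prefix + closings.
lemma pvLoop_equiv (pair : List Int) :
    ∀ (ps : List (Int × Int)) (o c tr : List Int) (rem : Int),
      (∀ p ∈ ps, ∀ j ∈ o, j < p.1) →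
      ps.Pairwise (fun p q => p.1 < q.1) →
      c.length ≤ o.length →
      (∀ j, j ∈ tr ↔ j ∈ o.take c.length ++ c) →
      ∀ j, j ∈ pvLoopA (ps.map (fun p => (p.1, pvMarkA pair p.2))) (o.drop c.length) tr rem ↔
        j ∈ (ps.foldl (pvStepB pair) (o, c)).1.take (ps.foldl (pvStepB pair) (o, c)).2.length
          ++ (ps.foldl (pvStepB pair) (o, c)).2 := by
  intro ps
  induction ps with
  | nil =>
    intro o c tr rem _ _ _ hmem j
    simpa [pvLoopA] using hmem j
  | cons p rest ih =>
    intro o c tr rem hlt hpw hlen hmem j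
    obtain ⟨i, x⟩ := p
    have hpw' := (List.pairwise_cons.mp hpw).2
    have hfirst := (List.pairwise_cons.mp hpw).1
    by_cases h1 : PySem.List.pyGet? pair 0 = some x
    · -- opening
      have hmk : pvMarkA pair x = 1 := by simp [pvMarkA, h1]
      have hdrop : (o ++ [i]).drop c.length = o.drop c.length ++ [i] := by
        rw [List.drop_append_of_le_length hlen]
      have htake : (o ++ [i]).take c.length = o.take c.length := by
        rw [List.take_append_of_le_length hlen]
      have := ih (o ++ [i]) c tr rem
        (by
          intro q hq k hk
          rcases List.mem_append.mp hk with hk | hk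
          · exact hlt q (List.mem_cons_of_mem _ hq) k hk
          · simp at hk; subst hk; exact hfirst q hq)
        hpw' (le_trans hlen (by simp)) (by simpa [htake] using hmem) j
      simpa [pvLoopA, hmk, pvStepB, h1, hdrop] using this
    · by_cases h2 : PySem.List.pyGet? pair 1 = some x
      · -- closing
        have hmk : pvMarkA pair x = 2 := by simp [pvMarkA, h1, h2]
        by_cases hc : c.length < o.length
        · -- matched: A pops, ghost appends i to c
          have hcons : o.drop c.length = o[c.length] :: o.drop (c.length + 1) :=
            List.drop_eq_getElem_cons hc
          have hlo : o[c.length] < i :=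
            hlt (i, x) (List.mem_cons_self) _ (List.getElem_mem hc)
          have htake : o.take (c.length + 1) = o.take c.length ++ [o[c.length]] := by
            rw [List.take_add_one]
            simp [List.getElem?_eq_getElem hc]
          have hstep : pvStepB pair (o, c) (i, x) = (o, c ++ [i]) := by
            simp [pvStepB, h1, h2, hc]
          have hih := ih o (c ++ [i]) (tr ++ [o[c.length]] ++ [i]) o[c.length]
            (by intro q hq k hk; exact hlt q (List.mem_cons_of_mem _ hq) k hk)
            hpw' (by simp only [List.length_append, List.length_cons, List.length_nil]; omega)
            (by
              intro k
              have hk := hmem k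
              simp only [List.length_append, List.length_cons, List.length_nil, zero_add]
              rw [htake]
              simp only [List.mem_append, List.mem_singleton] at *
              tauto)
            j
          simp only [List.length_append, List.length_cons, List.length_nil, zero_add] at hih
          simp only [List.map_cons, List.foldl_cons, hstep]
          rw [hcons]
          simpa [pvLoopA, hmk, hlo, hc] using hih
        · -- unmatched closing: both sides skip
          have hfh : o.drop c.length = [] := by
            apply List.drop_eq_nil_of_le; omega
          have := ih o c tr rem
            (by intro q hq k hk; exact hlt q (List.mem_cons_of_mem _ hq) k hk)
            hpw' hlen hmem j
          simpa [pvLoopA, hmk, pvStepB, h1, h2, hfh, hc] using this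
      · -- neither
        have hmk : pvMarkA pair x = 0 := by simp [pvMarkA, h1, h2]
        have := ih o c tr rem
          (by intro q hq k hk; exact hlt q (List.mem_cons_of_mem _ hq) k hk)
          hpw' hlen hmem j
        simpa [pvLoopA, hmk, pvStepB, h1, h2] using this

-- Shape of the ghost fold: components only grow by indices taken from the input.
lemma pvF_shape (pair : List Int) :
    ∀ (ps : List (Int × Int)) (o c : List Int),
      ∃ r1 r2, (ps.foldl (pvStepB pair) (o, c)).1 = o ++ r1 ∧
        (ps.foldl (pvStepB pair) (o, c)).2 = c ++ r2 ∧
        (∀ k ∈ r1, ∃ p ∈ ps, k = p.1) ∧ (∀ k ∈ r2, ∃ p ∈ ps, k = p.1) := by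
  intro ps
  induction ps with
  | nil => intro o c; exact ⟨[], [], by simp, by simp, by simp, by simp⟩
  | cons p rest ih =>
    intro o c
    obtain ⟨i, x⟩ := p
    by_cases h1 : PySem.List.pyGet? pair 0 = some x
    · obtain ⟨r1, r2, hO, hC, hr1, hr2⟩ := ih (o ++ [i]) c
      refine ⟨i :: r1, r2, ?_, ?_, ?_, ?_⟩
      · simpa [pvStepB, h1, List.append_assoc] using hO
      · simpa [pvStepB, h1] using hC
      · intro k hk
        rcases List.mem_cons.mp hk with hk | hk
        · exact ⟨(i, x), List.mem_cons_self, hk⟩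
        · obtain ⟨q, hq, hkq⟩ := hr1 k hk; exact ⟨q, List.mem_cons_of_mem _ hq, hkq⟩
      · intro k hk
        obtain ⟨q, hq, hkq⟩ := hr2 k hk; exact ⟨q, List.mem_cons_of_mem _ hq, hkq⟩
    · by_cases h2 : PySem.List.pyGet? pair 1 = some x
      · by_cases hc : c.length < o.length
        · obtain ⟨r1, r2, hO, hC, hr1, hr2⟩ := ih o (c ++ [i])
          refine ⟨r1, i :: r2, ?_, ?_, ?_, ?_⟩
          · simpa [pvStepB, h1, h2, hc] using hO
          · simpa [pvStepB, h1, h2, hc, List.append_assoc] using hC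
          · intro k hk
            obtain ⟨q, hq, hkq⟩ := hr1 k hk; exact ⟨q, List.mem_cons_of_mem _ hq, hkq⟩
          · intro k hk
            rcases List.mem_cons.mp hk with hk | hk
            · exact ⟨(i, x), List.mem_cons_self, hk⟩
            · obtain ⟨q, hq, hkq⟩ := hr2 k hk; exact ⟨q, List.mem_cons_of_mem _ hq, hkq⟩
        · obtain ⟨r1, r2, hO, hC, hr1, hr2⟩ := ih o c
          refine ⟨r1, r2, ?_, ?_, ?_, ?_⟩
          · simpa [pvStepB, h1, h2, hc] using hO
          · simpa [pvStepB, h1, h2, hc] using hC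
          · intro k hk; obtain ⟨q, hq, hkq⟩ := hr1 k hk
            exact ⟨q, List.mem_cons_of_mem _ hq, hkq⟩
          · intro k hk; obtain ⟨q, hq, hkq⟩ := hr2 k hk
            exact ⟨q, List.mem_cons_of_mem _ hq, hkq⟩
      · obtain ⟨r1, r2, hO, hC, hr1, hr2⟩ := ih o c
        refine ⟨r1, r2, ?_, ?_, ?_, ?_⟩
        · simpa [pvStepB, h1, h2] using hO
        · simpa [pvStepB, h1, h2] using hC
        · intro k hk; obtain ⟨q, hq, hkq⟩ := hr1 k hk
          exact ⟨q, List.mem_cons_of_mem _ hq, hkq⟩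
        · intro k hk; obtain ⟨q, hq, hkq⟩ := hr2 k hk
          exact ⟨q, List.mem_cons_of_mem _ hq, hkq⟩

-- Membership of the pivot element in a take of o ++ i :: r with o < i < r.
lemma pvMemTake (o r : List Int) (i : Int) (n : Nat)
    (ho : ∀ k ∈ o, k < i) (_hr : ∀ k ∈ r, i < k) :
    i ∈ (o ++ i :: r).take n ↔ o.length < n := by
  rw [List.take_append]
  constructor
  · intro h
    by_contra hn
    rw [Nat.not_lt] at hn
    have h0 : n - o.length = 0 := by omega
    rw [h0] at h
    simp only [List.take_zero, List.append_nil] at h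
    exact absurd (ho i (List.mem_of_mem_take h)) (lt_irrefl i)
  · intro h
    have h1 : n - o.length = (n - o.length - 1) + 1 := by omega
    rw [h1, List.take_succ_cons]
    simp

-- Pass-1 invariant: (closings, deficit, maxdef) = (|c| + u, |c| + u - |o|, u),
-- where c is the ghost list of matched closings and u counts unmatched ones.
lemma pvPass1_spec (pair : List Int) :
    ∀ (ps : List (Int × Int)) (o c : List Int) (u : Int),
      0 ≤ u → c.length ≤ o.length →
      ∃ u' d', 0 ≤ u' ∧
        ps.foldl (fun st p => pvPass1 pair st p.2)
            ((c.length : Int) + u, (c.length : Int) + u - (o.length : Int), u)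
          = (((ps.foldl (pvStepB pair) (o, c)).2.length : Int) + u', d', u') := by
  intro ps
  induction ps with
  | nil =>
    intro o c u hu _
    exact ⟨u, (c.length : Int) + u - (o.length : Int), hu, by simp⟩
  | cons p rest ih =>
    intro o c u hu hlen
    obtain ⟨i, x⟩ := p
    by_cases h1 : PySem.List.pyGet? pair 0 = some x
    · -- opening
      obtain ⟨u', d', hu', hfold⟩ := ih (o ++ [i]) c u hu (by simp; omega)
      refine ⟨u', d', hu', ?_⟩
      have hA : pvPass1 pair ((c.length : Int) + u, (c.length : Int) + u - (o.length : Int), u) x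
          = ((c.length : Int) + u, (c.length : Int) + u - (((o ++ [i]).length : Int)), u) := by
        unfold pvPass1
        rw [if_pos h1]
        dsimp only
        simp only [Prod.mk.injEq]
        push_cast [List.length_append, List.length_cons, List.length_nil]
        refine ⟨?_, ?_, ?_⟩ <;> first | trivial | omega
      have hB : pvStepB pair (o, c) (i, x) = (o ++ [i], c) := by simp [pvStepB, h1]
      simp only [List.foldl_cons, hA, hB]
      exact hfold
    · by_cases h2 : PySem.List.pyGet? pair 1 = some x
      · by_cases hc : c.length < o.length
        · -- matched closing
          obtain ⟨u', d', hu', hfold⟩ := ih o (c ++ [i]) u hu (by simp; omega)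
          refine ⟨u', d', hu', ?_⟩
          have hmx : ¬ ((c.length : Int) + u - (o.length : Int) + 1 > u) := by
            push_cast; omega
          have hA : pvPass1 pair ((c.length : Int) + u, (c.length : Int) + u - (o.length : Int), u) x
              = ((((c ++ [i]).length : Int)) + u, (((c ++ [i]).length : Int)) + u - (o.length : Int), u) := by
            unfold pvPass1
            rw [if_neg h1, if_pos h2]
            dsimp only
            rw [if_neg hmx]
            simp only [Prod.mk.injEq]
            push_cast [List.length_append, List.length_cons, List.length_nil]
            refine ⟨?_, ?_, ?_⟩ <;> first | trivial | omega
          have hB : pvStepB pair (o, c) (i, x) = (o, c ++ [i]) := by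
            simp [pvStepB, h1, h2, hc]
          simp only [List.foldl_cons, hA, hB]
          exact hfold
        · -- unmatched closing
          have heq : c.length = o.length := le_antisymm hlen (by omega)
          obtain ⟨u', d', hu', hfold⟩ := ih o c (u + 1) (by omega) hlen
          refine ⟨u', d', hu', ?_⟩
          have hmx : (c.length : Int) + u - (o.length : Int) + 1 > u := by
            rw [heq]; push_cast; omega
          have hA : pvPass1 pair ((c.length : Int) + u, (c.length : Int) + u - (o.length : Int), u) x
              = ((c.length : Int) + (u + 1), (c.length : Int) + (u + 1) - (o.length : Int), u + 1) := by
            unfold pvPass1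
            rw [if_neg h1, if_pos h2]
            dsimp only
            rw [if_pos hmx]
            simp only [Prod.mk.injEq]
            push_cast [List.length_append, List.length_cons, List.length_nil]
            refine ⟨?_, ?_, ?_⟩ <;> first | trivial | omega
          have hB : pvStepB pair (o, c) (i, x) = (o, c) := by
            simp [pvStepB, h1, h2, hc]
          simp only [List.foldl_cons, hA, hB]
          exact hfold
      · obtain ⟨u', d', hu', hfold⟩ := ih o c u hu hlen
        refine ⟨u', d', hu', ?_⟩
        have hA : pvPass1 pair ((c.length : Int) + u, (c.length : Int) + u - (o.length : Int), u) x
            = ((c.length : Int) + u, (c.length : Int) + u - (o.length : Int), u) := by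
          simp [pvPass1, h1, h2]
        have hB : pvStepB pair (o, c) (i, x) = (o, c) := by simp [pvStepB, h1, h2]
        simp only [List.foldl_cons, hA, hB]
        exact hfold

-- Pass-2 invariant: with m = |C| (total matched closings) the counter pass emits
-- exactly the elements whose index is outside R = (take |C| of the openings) ++ C.
lemma pvPass2_spec (pair : List Int) (m : Int) (R : List Int) :
    ∀ (ps : List (Int × Int)) (o c : List Int) (u : Int) (out : List Int),
      (∀ p ∈ ps, ∀ k ∈ o, k < p.1) →
      (∀ p ∈ ps, ∀ k ∈ c, k < p.1) →
      ps.Pairwise (fun p q => p.1 < q.1) →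
      c.length ≤ o.length →
      0 ≤ u →
      m = ((ps.foldl (pvStepB pair) (o, c)).2.length : Int) →
      R = (ps.foldl (pvStepB pair) (o, c)).1.take (ps.foldl (pvStepB pair) (o, c)).2.length
          ++ (ps.foldl (pvStepB pair) (o, c)).2 →
      (ps.foldl (fun st p => pvPass2 pair m st p.2)
          (out, (o.length : Int), (c.length : Int) + u - (o.length : Int), u)).1
        = out ++ ps.filterMap (fun p => if p.1 ∈ R then none else some p.2) := by
  intro ps
  induction ps with
  | nil => intro o c u out _ _ _ _ _ _ _; simp
  | cons p rest ih =>
    intro o c u out hlo hlc hpw hlen hu hm hR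
    obtain ⟨i, x⟩ := p
    have hpw' := (List.pairwise_cons.mp hpw).2
    have hrest : ∀ q ∈ rest, i < q.1 := (List.pairwise_cons.mp hpw).1
    have ho_i : ∀ k ∈ o, k < i := hlo (i, x) List.mem_cons_self
    have hc_i : ∀ k ∈ c, k < i := hlc (i, x) List.mem_cons_self
    by_cases h1 : PySem.List.pyGet? pair 0 = some x
    · -- opening: ghost state becomes (o ++ [i], c)
      have hstep : pvStepB pair (o, c) (i, x) = (o ++ [i], c) := by simp [pvStepB, h1]
      rw [List.foldl_cons, hstep] at hm hR
      obtain ⟨r1, r2, hO, hC, hr1, hr2⟩ := pvF_shape pair rest (o ++ [i]) c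
      have hr1' : ∀ k ∈ r1, i < k := by
        intro k hk; obtain ⟨q, hq, hkq⟩ := hr1 k hk; subst hkq; exact hrest q hq
      have hr2' : ∀ k ∈ r2, i < k := by
        intro k hk; obtain ⟨q, hq, hkq⟩ := hr2 k hk; subst hkq; exact hrest q hq
      have hiC : i ∉ (rest.foldl (pvStepB pair) (o ++ [i], c)).2 := by
        rw [hC]
        intro hmem
        rcases List.mem_append.mp hmem with h | h
        · exact absurd (hc_i i h) (lt_irrefl i)
        · exact absurd (hr2' i h) (lt_irrefl i)
      have hO' : (rest.foldl (pvStepB pair) (o ++ [i], c)).1 = o ++ i :: r1 := by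
        rw [hO, List.append_assoc]; rfl
      have hiTake : i ∈ (rest.foldl (pvStepB pair) (o ++ [i], c)).1.take
            (rest.foldl (pvStepB pair) (o ++ [i], c)).2.length
          ↔ o.length < (rest.foldl (pvStepB pair) (o ++ [i], c)).2.length := by
        rw [hO']; exact pvMemTake o r1 i _ ho_i hr1'
      have hiR : i ∈ R ↔ o.length < (rest.foldl (pvStepB pair) (o ++ [i], c)).2.length := by
        rw [hR, List.mem_append]
        constructor
        · rintro (h | h)
          · exact hiTake.mp h
          · exact absurd h hiC
        · intro h; exact Or.inl (hiTake.mpr h)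
      by_cases hj : (o.length : Int) ≥ m
      · have hnotR : i ∉ R := by
          rw [hiR]; rw [hm] at hj; omega
        have hstep2 : pvPass2 pair m (out, (o.length : Int),
            (c.length : Int) + u - (o.length : Int), u) x
            = (out ++ [x], (((o ++ [i]).length : Int)),
               (c.length : Int) + u - (((o ++ [i]).length : Int)), u) := by
          unfold pvPass2
          rw [if_pos h1]
          dsimp only
          rw [if_pos hj]
          simp only [Prod.mk.injEq]
          refine ⟨trivial, ?_, ?_, trivial⟩
          · push_cast [List.length_append, List.length_cons, List.length_nil]; omega
          · push_cast [List.length_append, List.length_cons, List.length_nil]; omega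
        have ihn := ih (o ++ [i]) c u (out ++ [x])
          (by
            intro q hq k hk
            rcases List.mem_append.mp hk with hk | hk
            · exact hlo q (List.mem_cons_of_mem _ hq) k hk
            · simp at hk; subst hk; exact hrest q hq)
          (fun q hq => hlc q (List.mem_cons_of_mem _ hq))
          hpw' (by simp; omega) hu hm hR
        simp only [List.foldl_cons, hstep2]
        rw [ihn, List.filterMap_cons]
        simp [hnotR]
      · have hinR : i ∈ R := by
          rw [hiR]; rw [hm] at hj; omega
        have hstep2 : pvPass2 pair m (out, (o.length : Int),
            (c.length : Int) + u - (o.length : Int), u) x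
            = (out, (((o ++ [i]).length : Int)),
               (c.length : Int) + u - (((o ++ [i]).length : Int)), u) := by
          unfold pvPass2
          rw [if_pos h1]
          dsimp only
          rw [if_neg hj]
          simp only [Prod.mk.injEq]
          refine ⟨trivial, ?_, ?_, trivial⟩
          · push_cast [List.length_append, List.length_cons, List.length_nil]; omega
          · push_cast [List.length_append, List.length_cons, List.length_nil]; omega
        have ihn := ih (o ++ [i]) c u out
          (by
            intro q hq k hk
            rcases List.mem_append.mp hk with hk | hk
            · exact hlo q (List.mem_cons_of_mem _ hq) k hk
            · simp at hk; subst hk; exact hrest q hq)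
          (fun q hq => hlc q (List.mem_cons_of_mem _ hq))
          hpw' (by simp; omega) hu hm hR
        simp only [List.foldl_cons, hstep2]
        rw [ihn, List.filterMap_cons]
        simp [hinR]
    · by_cases h2 : PySem.List.pyGet? pair 1 = some x
      · by_cases hc : c.length < o.length
        · -- matched closing: dropped, ghost appends i to c
          have hstep : pvStepB pair (o, c) (i, x) = (o, c ++ [i]) := by
            simp [pvStepB, h1, h2, hc]
          rw [List.foldl_cons, hstep] at hm hR
          obtain ⟨r1, r2, hO, hC, hr1, hr2⟩ := pvF_shape pair rest o (c ++ [i])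
          have hiC : i ∈ (rest.foldl (pvStepB pair) (o, c ++ [i])).2 := by
            rw [hC]; simp
          have hinR : i ∈ R := by rw [hR, List.mem_append]; exact Or.inr hiC
          have hcond : ¬ ((c.length : Int) + u - (o.length : Int) + 1 > u) := by
            push_cast; omega
          have hstep2 : pvPass2 pair m (out, (o.length : Int),
              (c.length : Int) + u - (o.length : Int), u) x
              = (out, (o.length : Int),
                 (((c ++ [i]).length : Int)) + u - (o.length : Int), u) := by
            unfold pvPass2
            rw [if_neg h1, if_pos h2]
            dsimp only
            rw [if_neg hcond]
            simp only [Prod.mk.injEq]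
            refine ⟨trivial, trivial, ?_, trivial⟩
            push_cast [List.length_append, List.length_cons, List.length_nil]; omega
          have ihn := ih o (c ++ [i]) u out
            (fun q hq => hlo q (List.mem_cons_of_mem _ hq))
            (by
              intro q hq k hk
              rcases List.mem_append.mp hk with hk | hk
              · exact hlc q (List.mem_cons_of_mem _ hq) k hk
              · simp at hk; subst hk; exact hrest q hq)
            hpw' (by simp; omega) hu hm hR
          simp only [List.foldl_cons, hstep2]
          rw [ihn, List.filterMap_cons]
          simp [hinR]
        · -- unmatched closing: kept, ghost unchanged, u increments
          have heq : c.length = o.length := le_antisymm hlen (by omega)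
          have hstep : pvStepB pair (o, c) (i, x) = (o, c) := by
            simp [pvStepB, h1, h2, hc]
          rw [List.foldl_cons, hstep] at hm hR
          obtain ⟨r1, r2, hO, hC, hr1, hr2⟩ := pvF_shape pair rest o c
          have hr1' : ∀ k ∈ r1, i < k := by
            intro k hk; obtain ⟨q, hq, hkq⟩ := hr1 k hk; subst hkq; exact hrest q hq
          have hr2' : ∀ k ∈ r2, i < k := by
            intro k hk; obtain ⟨q, hq, hkq⟩ := hr2 k hk; subst hkq; exact hrest q hq
          have hiO : i ∉ (rest.foldl (pvStepB pair) (o, c)).1 := by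
            rw [hO]; intro hmem
            rcases List.mem_append.mp hmem with h | h
            · exact absurd (ho_i i h) (lt_irrefl i)
            · exact absurd (hr1' i h) (lt_irrefl i)
          have hiC : i ∉ (rest.foldl (pvStepB pair) (o, c)).2 := by
            rw [hC]; intro hmem
            rcases List.mem_append.mp hmem with h | h
            · exact absurd (hc_i i h) (lt_irrefl i)
            · exact absurd (hr2' i h) (lt_irrefl i)
          have hnotR : i ∉ R := by
            rw [hR]; intro hmem
            rcases List.mem_append.mp hmem with h | h
            · exact hiO (List.mem_of_mem_take h)
            · exact hiC h
          have hcond : (c.length : Int) + u - (o.length : Int) + 1 > u := by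
            rw [heq]; push_cast; omega
          have hstep2 : pvPass2 pair m (out, (o.length : Int),
              (c.length : Int) + u - (o.length : Int), u) x
              = (out ++ [x], (o.length : Int),
                 (c.length : Int) + (u + 1) - (o.length : Int), u + 1) := by
            unfold pvPass2
            rw [if_neg h1, if_pos h2]
            dsimp only
            rw [if_pos hcond]
            simp only [Prod.mk.injEq]
            refine ⟨trivial, trivial, ?_, ?_⟩
            · push_cast [List.length_append, List.length_cons, List.length_nil]; omega
            · push_cast [List.length_append, List.length_cons, List.length_nil]; omega
          have ihn := ih o c (u + 1) (out ++ [x])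
            (fun q hq => hlo q (List.mem_cons_of_mem _ hq))
            (fun q hq => hlc q (List.mem_cons_of_mem _ hq))
            hpw' hlen (by omega) hm hR
          simp only [List.foldl_cons, hstep2]
          rw [ihn, List.filterMap_cons]
          simp [hnotR]
      · -- neither: kept
        have hstep : pvStepB pair (o, c) (i, x) = (o, c) := by simp [pvStepB, h1, h2]
        rw [List.foldl_cons, hstep] at hm hR
        obtain ⟨r1, r2, hO, hC, hr1, hr2⟩ := pvF_shape pair rest o c
        have hr1' : ∀ k ∈ r1, i < k := by
          intro k hk; obtain ⟨q, hq, hkq⟩ := hr1 k hk; subst hkq; exact hrest q hq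
        have hr2' : ∀ k ∈ r2, i < k := by
          intro k hk; obtain ⟨q, hq, hkq⟩ := hr2 k hk; subst hkq; exact hrest q hq
        have hnotR : i ∉ R := by
          rw [hR]; intro hmem
          rcases List.mem_append.mp hmem with h | h
          · have h' := List.mem_of_mem_take h
            rw [hO] at h'
            rcases List.mem_append.mp h' with h'' | h''
            · exact absurd (ho_i i h'') (lt_irrefl i)
            · exact absurd (hr1' i h'') (lt_irrefl i)
          · rw [hC] at h
            rcases List.mem_append.mp h with h'' | h''
            · exact absurd (hc_i i h'') (lt_irrefl i)
            · exact absurd (hr2' i h'') (lt_irrefl i)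
        have hstep2 : pvPass2 pair m (out, (o.length : Int),
            (c.length : Int) + u - (o.length : Int), u) x
            = (out ++ [x], (o.length : Int),
               (c.length : Int) + u - (o.length : Int), u) := by
          simp [pvPass2, h1, h2]
        have ihn := ih o c u (out ++ [x])
          (fun q hq => hlo q (List.mem_cons_of_mem _ hq))
          (fun q hq => hlc q (List.mem_cons_of_mem _ hq))
          hpw' hlen hu hm hR
        simp only [List.foldl_cons, hstep2]
        rw [ihn, List.filterMap_cons]
        simp [hnotR]

-- A's removal list has the same members as the ghost removal list.
lemma pvRemoval_mem (pair trace : List Int) (j : Int) :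
    (j ∈ pvLoopA (PySem.List.enumerate (trace.map (pvMarkA pair)) 0) [] [] 0) ↔
      (j ∈ ((PySem.List.enumerate trace 0).foldl (pvStepB pair) ([], [])).1.take
            ((PySem.List.enumerate trace 0).foldl (pvStepB pair) ([], [])).2.length
          ++ ((PySem.List.enumerate trace 0).foldl (pvStepB pair) ([], [])).2) := by
  rw [pvEnum_map]
  have h := pvLoop_equiv pair (PySem.List.enumerate trace 0) [] [] [] 0
    (by intro q hq k hk; simp at hk)
    (PySem.List.pairwise_lt_enumerate trace 0)
    (by simp) (by simp) j
  simpa using h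

-- The two final comprehensions agree whenever the removal lists have the same members.
lemma pvFilter_eq (trace : List Int) (R S : List Int) (hRS : ∀ j, j ∈ R ↔ j ∈ S) :
    (PySem.List.pyRange 0 (PySem.List.len trace) 1).filterMap (fun i =>
        if i ∈ R then none else PySem.List.pyGet? trace i)
      = (PySem.List.enumerate trace 0).filterMap (fun p =>
        if p.1 ∈ S then none else some p.2) := by
  rw [PySem.List.enumerate_eq_map_pyRange (d := 0), List.filterMap_map]
  apply List.filterMap_congr
  intro i hi
  have hrange := (PySem.List.mem_pyRange_one).mp hi
  have hn : i.toNat < trace.length := by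
    have := hrange.2; simp [PySem.List.len_eq] at this; omega
  by_cases hmem : i ∈ R
  · simp [hmem, (hRS i).mp hmem]
  · have hmem' : i ∉ S := fun h => hmem ((hRS i).mpr h)
    simp only [hmem, hmem', Function.comp, ite_false]
    have hlt2 : i < (trace.length : Int) := by
      have := hrange.2; simpa [PySem.List.len_eq] using this
    simp [PySem.List.pyGet?, PySem.List.pyIdx?, PySem.List.pyGetD, hlt2, hrange.1,
      List.getElem?_eq_getElem hn]

theorem remove_binary_pattern_spec : Claim_equal_remove_binary_pattern := by
  intro pair trace _ _
  unfold Spec_remove_binary_pattern remove_binary_pattern remove_binary_pattern_alt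
  dsimp only
  -- pass 1 computes m = |C| (total matched closings)
  obtain ⟨u', d', hu', hfold⟩ :=
    pvPass1_spec pair (PySem.List.enumerate trace 0) [] [] 0 le_rfl le_rfl
  simp only [List.length_nil, Nat.cast_zero, add_zero, zero_add, sub_zero] at hfold
  rw [pvFoldVals (pvPass1 pair) trace 0] at hfold
  rw [hfold]
  dsimp only
  have hm : (((PySem.List.enumerate trace 0).foldl (pvStepB pair) ([], [])).2.length : Int) + u' - u'
      = (((PySem.List.enumerate trace 0).foldl (pvStepB pair) ([], [])).2.length : Int) := by ring
  rw [hm]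
  -- pass 2 emits the complement of R
  rw [← pvFoldVals (pvPass2 pair
    (((PySem.List.enumerate trace 0).foldl (pvStepB pair) ([], [])).2.length : Int)) trace 0]
  have h2 := pvPass2_spec pair
    (((PySem.List.enumerate trace 0).foldl (pvStepB pair) ([], [])).2.length : Int)
    (((PySem.List.enumerate trace 0).foldl (pvStepB pair) ([], [])).1.take
        ((PySem.List.enumerate trace 0).foldl (pvStepB pair) ([], [])).2.length
      ++ ((PySem.List.enumerate trace 0).foldl (pvStepB pair) ([], [])).2)
    (PySem.List.enumerate trace 0) [] [] 0 []
    (by intro q hq k hk; simp at hk)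
    (by intro q hq k hk; simp at hk)
    (PySem.List.pairwise_lt_enumerate trace 0)
    le_rfl le_rfl rfl rfl
  simp only [List.length_nil, Nat.cast_zero, add_zero, zero_add, sub_zero,
    List.nil_append] at h2
  rw [h2]
  exact pvFilter_eq trace _ _ (pvRemoval_mem pair trace)
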